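-- pv_equiv track=rewrite | github.com/antonyxiao/hycd | suggest_corrections.py | parse_pinyin
-- ===== SOURCE A (Python) =====
-- initials = sorted(['b', 'p', 'm', 'f', 'd', 't', 'n', 'l', 'g', 'k', 'h', 'j', 'q', 'x', 'zh', 'ch', 'sh', 'r', 'z', 'c', 's', 'y', 'w'], key=len, reverse=True)
--
-- def parse_pinyin(p):
--     if not p:
--         return "", "", 5
--
--     if p[-1].isdigit():
--         tone = int(p[-1])
--         syl = p[:-1]
--     else:
--         tone = 5
--         syl = p
--
--     initial = ""
--     final = syl
--     for ini in initials:
--         if syl.startswith(ini):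
--             initial = ini
--             final = syl[len(ini):]
--             break
--     return initial, final, tone
-- ===== SOURCE B (Python) =====
-- TWO = {'zh', 'ch', 'sh'}
-- ONE = {'b', 'p', 'm', 'f', 'd', 't', 'n', 'l', 'g', 'k', 'h',
--        'j', 'q', 'x', 'r', 'z', 'c', 's', 'y', 'w'}
--
-- def parse_pinyin(p):
--     if not p:
--         return "", "", 5
--     if p[-1].isdigit():
--         tone, syl = int(p[-1]), p[:-1]
--     else:
--         tone, syl = 5, p
--     if syl[:2] in TWO:
--         return syl[:2], syl[2:], tone
--     if syl[:1] in ONE: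
--         return syl[:1], syl[1:], tone
--     return "", syl, tone
-- ===== Notes on version B (the rewrite author's own statement) =====
-- stated objective: simpler
-- what changed: Replaces A's linear scan over a length-sorted 23-element initials list by two fixed-length prefix lookups: the 2-char prefix in the set {zh,ch,sh}, then the 1-char prefix in the set of single-letter initials.
import Mathlib
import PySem

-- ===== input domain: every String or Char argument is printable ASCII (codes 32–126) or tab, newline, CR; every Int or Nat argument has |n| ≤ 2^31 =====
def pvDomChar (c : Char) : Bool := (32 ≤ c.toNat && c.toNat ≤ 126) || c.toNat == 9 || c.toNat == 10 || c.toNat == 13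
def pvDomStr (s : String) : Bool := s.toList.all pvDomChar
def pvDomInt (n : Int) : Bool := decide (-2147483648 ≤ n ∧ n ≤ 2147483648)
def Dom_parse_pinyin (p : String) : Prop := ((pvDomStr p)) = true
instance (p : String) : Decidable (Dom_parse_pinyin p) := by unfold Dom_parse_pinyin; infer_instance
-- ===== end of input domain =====

-- B replaces A's scan over a length-sorted initials list by two fixed-length prefix
-- lookups in constant sets (objective: simpler).

-- ===== PORT A =====
-- initials = sorted([...], key=len, reverse=True)
def pinyinInitials : List String :=
  PySem.List.sorted
    ["b", "p", "m", "f", "d", "t", "n", "l", "g", "k", "h", "j", "q", "x",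
     "zh", "ch", "sh", "r", "z", "c", "s", "y", "w"]
    (fun s => (PySem.Str.len s : Int)) true

-- the 'for ini in initials: ... break' loop, with initial="", final=syl as the fallthrough
def pinyinScan (inis : List String) (syl : String) : String × String :=
  match inis with
  | [] => ("", syl)
  | ini :: rest =>
    if PySem.Str.startswith syl ini then
      (ini, PySem.Str.slice syl (some (PySem.Str.len ini)) none)
    else pinyinScan rest syl

def parse_pinyin (p : String) : String × String × Int :=
  if PySem.Str.len p = 0 then ("", "", 5)
  else
    let lastc := (PySem.Str.pyGet? p (-1)).getD ' '   -- p[-1]; p nonempty, so never the default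
    let ts : Int × String :=
      if PySem.Chars.isdigit lastc then
        ((PySem.Int.ofStr? (String.ofList [lastc])).getD 0,  -- int(p[-1]); a digit, so never the default
         PySem.Str.slice p none (some (-1)))
      else (5, p)
    let r := pinyinScan pinyinInitials ts.2
    (r.1, r.2, ts.1)

-- ===== PORT B =====
def pinyinTWO : PySem.Set String := PySem.Set.ofList ["zh", "ch", "sh"]
def pinyinONE : PySem.Set String :=
  PySem.Set.ofList ["b", "p", "m", "f", "d", "t", "n", "l", "g", "k", "h",
                    "j", "q", "x", "r", "z", "c", "s", "y", "w"]

def parse_pinyin_alt (p : String) : String × String × Int :=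
  if PySem.Str.len p = 0 then ("", "", 5)
  else
    let lastc := (PySem.Str.pyGet? p (-1)).getD ' '
    let ts : Int × String :=
      if PySem.Chars.isdigit lastc then
        ((PySem.Int.ofStr? (String.ofList [lastc])).getD 0,
         PySem.Str.slice p none (some (-1)))
      else (5, p)
    let syl := ts.2
    if (PySem.Str.slice syl none (some 2)) ∈ pinyinTWO then
      (PySem.Str.slice syl none (some 2), PySem.Str.slice syl (some 2) none, ts.1)
    else if (PySem.Str.slice syl none (some 1)) ∈ pinyinONE then
      (PySem.Str.slice syl none (some 1), PySem.Str.slice syl (some 1) none, ts.1)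
    else ("", syl, ts.1)

-- ===== PRECONDITION & SPEC =====
def Spec_parse_pinyin (p : String) (out : String × String × Int) : Prop := out = parse_pinyin_alt p
instance (p : String) (out : String × String × Int) : Decidable (Spec_parse_pinyin p out) := by unfold Spec_parse_pinyin; infer_instance

-- ===== CLAIM (what is proved, stated in full; the proofs are below) =====
def Claim_equal_parse_pinyin : Prop := ∀ (p : String), Dom_parse_pinyin p → Spec_parse_pinyin p (parse_pinyin p)

-- ===== LEMMAS AND PROOFS =====

theorem sw (syl ini : String) : (PySem.Str.startswith syl ini = true) ↔ syl.toList.take ini.toList.length = ini.toList := by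
  rw [PySem.Str.startswith_eq, PySem.Chars.startswith_iff, List.prefix_iff_eq_take, eq_comm]
set_option maxHeartbeats 4000000 in
theorem pinyinScan_eq_alt (syl : String) :
    pinyinScan pinyinInitials syl =
      (if (PySem.Str.slice syl none (some 2)) ∈ pinyinTWO then
         (PySem.Str.slice syl none (some 2), PySem.Str.slice syl (some 2) none)
       else if (PySem.Str.slice syl none (some 1)) ∈ pinyinONE then
         (PySem.Str.slice syl none (some 1), PySem.Str.slice syl (some 1) none)
       else ("", syl)) := by
  have hI : pinyinInitials =
    ["zh", "ch", "sh", "b", "p", "m", "f", "d", "t", "n", "l", "g", "k", "h", "j", "q", "x",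
     "r", "z", "c", "s", "y", "w"] := by decide
  have hT : pinyinTWO = ["zh", "ch", "sh"] := by decide
  have hO : pinyinONE = ["b", "p", "m", "f", "d", "t", "n", "l", "g", "k", "h",
                    "j", "q", "x", "r", "z", "c", "s", "y", "w"] := by decide
  have r2 : (PySem.Str.slice syl none (some 2)).toList = syl.toList.take 2 := by
    simp [PySem.List.slice_to]
  have r1 : (PySem.Str.slice syl none (some 1)).toList = syl.toList.take 1 := by
    simp [PySem.List.slice_to]
  have q_zh : (PySem.Str.startswith syl "zh" = true) ↔ syl.toList.take 2 = ['z','h'] := by rw [sw]; exact Iff.rfl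
  have q_ch : (PySem.Str.startswith syl "ch" = true) ↔ syl.toList.take 2 = ['c','h'] := by rw [sw]; exact Iff.rfl
  have q_sh : (PySem.Str.startswith syl "sh" = true) ↔ syl.toList.take 2 = ['s','h'] := by rw [sw]; exact Iff.rfl
  have q_b : (PySem.Str.startswith syl "b" = true) ↔ syl.toList.take 1 = ['b'] := by rw [sw]; exact Iff.rfl
  have q_p : (PySem.Str.startswith syl "p" = true) ↔ syl.toList.take 1 = ['p'] := by rw [sw]; exact Iff.rfl
  have q_m : (PySem.Str.startswith syl "m" = true) ↔ syl.toList.take 1 = ['m'] := by rw [sw]; exact Iff.rfl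
  have q_f : (PySem.Str.startswith syl "f" = true) ↔ syl.toList.take 1 = ['f'] := by rw [sw]; exact Iff.rfl
  have q_d : (PySem.Str.startswith syl "d" = true) ↔ syl.toList.take 1 = ['d'] := by rw [sw]; exact Iff.rfl
  have q_t : (PySem.Str.startswith syl "t" = true) ↔ syl.toList.take 1 = ['t'] := by rw [sw]; exact Iff.rfl
  have q_n : (PySem.Str.startswith syl "n" = true) ↔ syl.toList.take 1 = ['n'] := by rw [sw]; exact Iff.rfl
  have q_l : (PySem.Str.startswith syl "l" = true) ↔ syl.toList.take 1 = ['l'] := by rw [sw]; exact Iff.rfl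
  have q_g : (PySem.Str.startswith syl "g" = true) ↔ syl.toList.take 1 = ['g'] := by rw [sw]; exact Iff.rfl
  have q_k : (PySem.Str.startswith syl "k" = true) ↔ syl.toList.take 1 = ['k'] := by rw [sw]; exact Iff.rfl
  have q_h : (PySem.Str.startswith syl "h" = true) ↔ syl.toList.take 1 = ['h'] := by rw [sw]; exact Iff.rfl
  have q_j : (PySem.Str.startswith syl "j" = true) ↔ syl.toList.take 1 = ['j'] := by rw [sw]; exact Iff.rfl
  have q_q : (PySem.Str.startswith syl "q" = true) ↔ syl.toList.take 1 = ['q'] := by rw [sw]; exact Iff.rfl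
  have q_x : (PySem.Str.startswith syl "x" = true) ↔ syl.toList.take 1 = ['x'] := by rw [sw]; exact Iff.rfl
  have q_r : (PySem.Str.startswith syl "r" = true) ↔ syl.toList.take 1 = ['r'] := by rw [sw]; exact Iff.rfl
  have q_z : (PySem.Str.startswith syl "z" = true) ↔ syl.toList.take 1 = ['z'] := by rw [sw]; exact Iff.rfl
  have q_c : (PySem.Str.startswith syl "c" = true) ↔ syl.toList.take 1 = ['c'] := by rw [sw]; exact Iff.rfl
  have q_s : (PySem.Str.startswith syl "s" = true) ↔ syl.toList.take 1 = ['s'] := by rw [sw]; exact Iff.rfl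
  have q_y : (PySem.Str.startswith syl "y" = true) ↔ syl.toList.take 1 = ['y'] := by rw [sw]; exact Iff.rfl
  have q_w : (PySem.Str.startswith syl "w" = true) ↔ syl.toList.take 1 = ['w'] := by rw [sw]; exact Iff.rfl
  have m_zh : (PySem.Str.slice syl none (some 2) = "zh") ↔ syl.toList.take 2 = ['z','h'] := by rw [String.ext_iff, r2]; exact Iff.rfl
  have m_ch : (PySem.Str.slice syl none (some 2) = "ch") ↔ syl.toList.take 2 = ['c','h'] := by rw [String.ext_iff, r2]; exact Iff.rfl
  have m_sh : (PySem.Str.slice syl none (some 2) = "sh") ↔ syl.toList.take 2 = ['s','h'] := by rw [String.ext_iff, r2]; exact Iff.rfl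
  have m_b : (PySem.Str.slice syl none (some 1) = "b") ↔ syl.toList.take 1 = ['b'] := by rw [String.ext_iff, r1]; exact Iff.rfl
  have m_p : (PySem.Str.slice syl none (some 1) = "p") ↔ syl.toList.take 1 = ['p'] := by rw [String.ext_iff, r1]; exact Iff.rfl
  have m_m : (PySem.Str.slice syl none (some 1) = "m") ↔ syl.toList.take 1 = ['m'] := by rw [String.ext_iff, r1]; exact Iff.rfl
  have m_f : (PySem.Str.slice syl none (some 1) = "f") ↔ syl.toList.take 1 = ['f'] := by rw [String.ext_iff, r1]; exact Iff.rfl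
  have m_d : (PySem.Str.slice syl none (some 1) = "d") ↔ syl.toList.take 1 = ['d'] := by rw [String.ext_iff, r1]; exact Iff.rfl
  have m_t : (PySem.Str.slice syl none (some 1) = "t") ↔ syl.toList.take 1 = ['t'] := by rw [String.ext_iff, r1]; exact Iff.rfl
  have m_n : (PySem.Str.slice syl none (some 1) = "n") ↔ syl.toList.take 1 = ['n'] := by rw [String.ext_iff, r1]; exact Iff.rfl
  have m_l : (PySem.Str.slice syl none (some 1) = "l") ↔ syl.toList.take 1 = ['l'] := by rw [String.ext_iff, r1]; exact Iff.rfl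
  have m_g : (PySem.Str.slice syl none (some 1) = "g") ↔ syl.toList.take 1 = ['g'] := by rw [String.ext_iff, r1]; exact Iff.rfl
  have m_k : (PySem.Str.slice syl none (some 1) = "k") ↔ syl.toList.take 1 = ['k'] := by rw [String.ext_iff, r1]; exact Iff.rfl
  have m_h : (PySem.Str.slice syl none (some 1) = "h") ↔ syl.toList.take 1 = ['h'] := by rw [String.ext_iff, r1]; exact Iff.rfl
  have m_j : (PySem.Str.slice syl none (some 1) = "j") ↔ syl.toList.take 1 = ['j'] := by rw [String.ext_iff, r1]; exact Iff.rfl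
  have m_q : (PySem.Str.slice syl none (some 1) = "q") ↔ syl.toList.take 1 = ['q'] := by rw [String.ext_iff, r1]; exact Iff.rfl
  have m_x : (PySem.Str.slice syl none (some 1) = "x") ↔ syl.toList.take 1 = ['x'] := by rw [String.ext_iff, r1]; exact Iff.rfl
  have m_r : (PySem.Str.slice syl none (some 1) = "r") ↔ syl.toList.take 1 = ['r'] := by rw [String.ext_iff, r1]; exact Iff.rfl
  have m_z : (PySem.Str.slice syl none (some 1) = "z") ↔ syl.toList.take 1 = ['z'] := by rw [String.ext_iff, r1]; exact Iff.rfl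
  have m_c : (PySem.Str.slice syl none (some 1) = "c") ↔ syl.toList.take 1 = ['c'] := by rw [String.ext_iff, r1]; exact Iff.rfl
  have m_s : (PySem.Str.slice syl none (some 1) = "s") ↔ syl.toList.take 1 = ['s'] := by rw [String.ext_iff, r1]; exact Iff.rfl
  have m_y : (PySem.Str.slice syl none (some 1) = "y") ↔ syl.toList.take 1 = ['y'] := by rw [String.ext_iff, r1]; exact Iff.rfl
  have m_w : (PySem.Str.slice syl none (some 1) = "w") ↔ syl.toList.take 1 = ['w'] := by rw [String.ext_iff, r1]; exact Iff.rfl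
  have l_zh : PySem.Str.len "zh" = 2 := rfl
  have l_ch : PySem.Str.len "ch" = 2 := rfl
  have l_sh : PySem.Str.len "sh" = 2 := rfl
  have l_b : PySem.Str.len "b" = 1 := rfl
  have l_p : PySem.Str.len "p" = 1 := rfl
  have l_m : PySem.Str.len "m" = 1 := rfl
  have l_f : PySem.Str.len "f" = 1 := rfl
  have l_d : PySem.Str.len "d" = 1 := rfl
  have l_t : PySem.Str.len "t" = 1 := rfl
  have l_n : PySem.Str.len "n" = 1 := rfl
  have l_l : PySem.Str.len "l" = 1 := rfl
  have l_g : PySem.Str.len "g" = 1 := rfl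
  have l_k : PySem.Str.len "k" = 1 := rfl
  have l_h : PySem.Str.len "h" = 1 := rfl
  have l_j : PySem.Str.len "j" = 1 := rfl
  have l_q : PySem.Str.len "q" = 1 := rfl
  have l_x : PySem.Str.len "x" = 1 := rfl
  have l_r : PySem.Str.len "r" = 1 := rfl
  have l_z : PySem.Str.len "z" = 1 := rfl
  have l_c : PySem.Str.len "c" = 1 := rfl
  have l_s : PySem.Str.len "s" = 1 := rfl
  have l_y : PySem.Str.len "y" = 1 := rfl
  have l_w : PySem.Str.len "w" = 1 := rfl
  rw [hI, hT, hO]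
  simp only [pinyinScan, List.mem_cons, List.not_mem_nil, or_false,
    q_zh, q_ch, q_sh, q_b, q_p, q_m, q_f, q_d, q_t, q_n, q_l, q_g, q_k, q_h, q_j, q_q, q_x, q_r, q_z, q_c, q_s, q_y, q_w,
    m_zh, m_ch, m_sh, m_b, m_p, m_m, m_f, m_d, m_t, m_n, m_l, m_g, m_k, m_h, m_j, m_q, m_x, m_r, m_z, m_c, m_s, m_y, m_w,
    l_zh, l_ch, l_sh, l_b, l_p, l_m, l_f, l_d, l_t, l_n, l_l, l_g, l_k, l_h, l_j, l_q, l_x, l_r, l_z, l_c, l_s, l_y, l_w]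
  by_cases c_zh : syl.toList.take 2 = ['z', 'h']
  · rw [if_pos c_zh]
    rw [if_pos (Or.inl (c_zh))]
    rw [(show PySem.Str.slice syl none (some 2) = "zh" from (by rw [String.ext_iff, r2, c_zh]; rfl))]
  by_cases c_ch : syl.toList.take 2 = ['c', 'h']
  · rw [if_neg c_zh, if_pos c_ch]
    rw [if_pos (Or.inr (Or.inl (c_ch)))]
    rw [(show PySem.Str.slice syl none (some 2) = "ch" from (by rw [String.ext_iff, r2, c_ch]; rfl))]
  by_cases c_sh : syl.toList.take 2 = ['s', 'h']
  · rw [if_neg c_zh, if_neg c_ch, if_pos c_sh]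
    rw [if_pos (Or.inr (Or.inr (c_sh)))]
    rw [(show PySem.Str.slice syl none (some 2) = "sh" from (by rw [String.ext_iff, r2, c_sh]; rfl))]
  by_cases c_b : syl.toList.take 1 = ['b']
  · rw [if_neg c_zh, if_neg c_ch, if_neg c_sh, if_pos c_b]
    rw [if_neg (by rintro (h|h|h); exacts [c_zh h, c_ch h, c_sh h])]
    rw [if_pos (Or.inl (c_b))]
    rw [(show PySem.Str.slice syl none (some 1) = "b" from (by rw [String.ext_iff, r1, c_b]; rfl))]
  by_cases c_p : syl.toList.take 1 = ['p']
  · rw [if_neg c_zh, if_neg c_ch, if_neg c_sh, if_neg c_b, if_pos c_p]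
    rw [if_neg (by rintro (h|h|h); exacts [c_zh h, c_ch h, c_sh h])]
    rw [if_pos (Or.inr (Or.inl (c_p)))]
    rw [(show PySem.Str.slice syl none (some 1) = "p" from (by rw [String.ext_iff, r1, c_p]; rfl))]
  by_cases c_m : syl.toList.take 1 = ['m']
  · rw [if_neg c_zh, if_neg c_ch, if_neg c_sh, if_neg c_b, if_neg c_p, if_pos c_m]
    rw [if_neg (by rintro (h|h|h); exacts [c_zh h, c_ch h, c_sh h])]
    rw [if_pos (Or.inr (Or.inr (Or.inl (c_m))))]
    rw [(show PySem.Str.slice syl none (some 1) = "m" from (by rw [String.ext_iff, r1, c_m]; rfl))]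
  by_cases c_f : syl.toList.take 1 = ['f']
  · rw [if_neg c_zh, if_neg c_ch, if_neg c_sh, if_neg c_b, if_neg c_p, if_neg c_m, if_pos c_f]
    rw [if_neg (by rintro (h|h|h); exacts [c_zh h, c_ch h, c_sh h])]
    rw [if_pos (Or.inr (Or.inr (Or.inr (Or.inl (c_f)))))]
    rw [(show PySem.Str.slice syl none (some 1) = "f" from (by rw [String.ext_iff, r1, c_f]; rfl))]
  by_cases c_d : syl.toList.take 1 = ['d']
  · rw [if_neg c_zh, if_neg c_ch, if_neg c_sh, if_neg c_b, if_neg c_p, if_neg c_m, if_neg c_f, if_pos c_d]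
    rw [if_neg (by rintro (h|h|h); exacts [c_zh h, c_ch h, c_sh h])]
    rw [if_pos (Or.inr (Or.inr (Or.inr (Or.inr (Or.inl (c_d))))))]
    rw [(show PySem.Str.slice syl none (some 1) = "d" from (by rw [String.ext_iff, r1, c_d]; rfl))]
  by_cases c_t : syl.toList.take 1 = ['t']
  · rw [if_neg c_zh, if_neg c_ch, if_neg c_sh, if_neg c_b, if_neg c_p, if_neg c_m, if_neg c_f, if_neg c_d, if_pos c_t]
    rw [if_neg (by rintro (h|h|h); exacts [c_zh h, c_ch h, c_sh h])]
    rw [if_pos (Or.inr (Or.inr (Or.inr (Or.inr (Or.inr (Or.inl (c_t)))))))]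
    rw [(show PySem.Str.slice syl none (some 1) = "t" from (by rw [String.ext_iff, r1, c_t]; rfl))]
  by_cases c_n : syl.toList.take 1 = ['n']
  · rw [if_neg c_zh, if_neg c_ch, if_neg c_sh, if_neg c_b, if_neg c_p, if_neg c_m, if_neg c_f, if_neg c_d, if_neg c_t, if_pos c_n]
    rw [if_neg (by rintro (h|h|h); exacts [c_zh h, c_ch h, c_sh h])]
    rw [if_pos (Or.inr (Or.inr (Or.inr (Or.inr (Or.inr (Or.inr (Or.inl (c_n))))))))]
    rw [(show PySem.Str.slice syl none (some 1) = "n" from (by rw [String.ext_iff, r1, c_n]; rfl))]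
  by_cases c_l : syl.toList.take 1 = ['l']
  · rw [if_neg c_zh, if_neg c_ch, if_neg c_sh, if_neg c_b, if_neg c_p, if_neg c_m, if_neg c_f, if_neg c_d, if_neg c_t, if_neg c_n, if_pos c_l]
    rw [if_neg (by rintro (h|h|h); exacts [c_zh h, c_ch h, c_sh h])]
    rw [if_pos (Or.inr (Or.inr (Or.inr (Or.inr (Or.inr (Or.inr (Or.inr (Or.inl (c_l)))))))))]
    rw [(show PySem.Str.slice syl none (some 1) = "l" from (by rw [String.ext_iff, r1, c_l]; rfl))]
  by_cases c_g : syl.toList.take 1 = ['g']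
  · rw [if_neg c_zh, if_neg c_ch, if_neg c_sh, if_neg c_b, if_neg c_p, if_neg c_m, if_neg c_f, if_neg c_d, if_neg c_t, if_neg c_n, if_neg c_l, if_pos c_g]
    rw [if_neg (by rintro (h|h|h); exacts [c_zh h, c_ch h, c_sh h])]
    rw [if_pos (Or.inr (Or.inr (Or.inr (Or.inr (Or.inr (Or.inr (Or.inr (Or.inr (Or.inl (c_g))))))))))]
    rw [(show PySem.Str.slice syl none (some 1) = "g" from (by rw [String.ext_iff, r1, c_g]; rfl))]
  by_cases c_k : syl.toList.take 1 = ['k']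
  · rw [if_neg c_zh, if_neg c_ch, if_neg c_sh, if_neg c_b, if_neg c_p, if_neg c_m, if_neg c_f, if_neg c_d, if_neg c_t, if_neg c_n, if_neg c_l, if_neg c_g, if_pos c_k]
    rw [if_neg (by rintro (h|h|h); exacts [c_zh h, c_ch h, c_sh h])]
    rw [if_pos (Or.inr (Or.inr (Or.inr (Or.inr (Or.inr (Or.inr (Or.inr (Or.inr (Or.inr (Or.inl (c_k)))))))))))]
    rw [(show PySem.Str.slice syl none (some 1) = "k" from (by rw [String.ext_iff, r1, c_k]; rfl))]
  by_cases c_h : syl.toList.take 1 = ['h']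
  · rw [if_neg c_zh, if_neg c_ch, if_neg c_sh, if_neg c_b, if_neg c_p, if_neg c_m, if_neg c_f, if_neg c_d, if_neg c_t, if_neg c_n, if_neg c_l, if_neg c_g, if_neg c_k, if_pos c_h]
    rw [if_neg (by rintro (h|h|h); exacts [c_zh h, c_ch h, c_sh h])]
    rw [if_pos (Or.inr (Or.inr (Or.inr (Or.inr (Or.inr (Or.inr (Or.inr (Or.inr (Or.inr (Or.inr (Or.inl (c_h))))))))))))]
    rw [(show PySem.Str.slice syl none (some 1) = "h" from (by rw [String.ext_iff, r1, c_h]; rfl))]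
  by_cases c_j : syl.toList.take 1 = ['j']
  · rw [if_neg c_zh, if_neg c_ch, if_neg c_sh, if_neg c_b, if_neg c_p, if_neg c_m, if_neg c_f, if_neg c_d, if_neg c_t, if_neg c_n, if_neg c_l, if_neg c_g, if_neg c_k, if_neg c_h, if_pos c_j]
    rw [if_neg (by rintro (h|h|h); exacts [c_zh h, c_ch h, c_sh h])]
    rw [if_pos (Or.inr (Or.inr (Or.inr (Or.inr (Or.inr (Or.inr (Or.inr (Or.inr (Or.inr (Or.inr (Or.inr (Or.inl (c_j)))))))))))))]
    rw [(show PySem.Str.slice syl none (some 1) = "j" from (by rw [String.ext_iff, r1, c_j]; rfl))]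
  by_cases c_q : syl.toList.take 1 = ['q']
  · rw [if_neg c_zh, if_neg c_ch, if_neg c_sh, if_neg c_b, if_neg c_p, if_neg c_m, if_neg c_f, if_neg c_d, if_neg c_t, if_neg c_n, if_neg c_l, if_neg c_g, if_neg c_k, if_neg c_h, if_neg c_j, if_pos c_q]
    rw [if_neg (by rintro (h|h|h); exacts [c_zh h, c_ch h, c_sh h])]
    rw [if_pos (Or.inr (Or.inr (Or.inr (Or.inr (Or.inr (Or.inr (Or.inr (Or.inr (Or.inr (Or.inr (Or.inr (Or.inr (Or.inl (c_q))))))))))))))]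
    rw [(show PySem.Str.slice syl none (some 1) = "q" from (by rw [String.ext_iff, r1, c_q]; rfl))]
  by_cases c_x : syl.toList.take 1 = ['x']
  · rw [if_neg c_zh, if_neg c_ch, if_neg c_sh, if_neg c_b, if_neg c_p, if_neg c_m, if_neg c_f, if_neg c_d, if_neg c_t, if_neg c_n, if_neg c_l, if_neg c_g, if_neg c_k, if_neg c_h, if_neg c_j, if_neg c_q, if_pos c_x]
    rw [if_neg (by rintro (h|h|h); exacts [c_zh h, c_ch h, c_sh h])]
    rw [if_pos (Or.inr (Or.inr (Or.inr (Or.inr (Or.inr (Or.inr (Or.inr (Or.inr (Or.inr (Or.inr (Or.inr (Or.inr (Or.inr (Or.inl (c_x)))))))))))))))]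
    rw [(show PySem.Str.slice syl none (some 1) = "x" from (by rw [String.ext_iff, r1, c_x]; rfl))]
  by_cases c_r : syl.toList.take 1 = ['r']
  · rw [if_neg c_zh, if_neg c_ch, if_neg c_sh, if_neg c_b, if_neg c_p, if_neg c_m, if_neg c_f, if_neg c_d, if_neg c_t, if_neg c_n, if_neg c_l, if_neg c_g, if_neg c_k, if_neg c_h, if_neg c_j, if_neg c_q, if_neg c_x, if_pos c_r]
    rw [if_neg (by rintro (h|h|h); exacts [c_zh h, c_ch h, c_sh h])]
    rw [if_pos (Or.inr (Or.inr (Or.inr (Or.inr (Or.inr (Or.inr (Or.inr (Or.inr (Or.inr (Or.inr (Or.inr (Or.inr (Or.inr (Or.inr (Or.inl (c_r))))))))))))))))]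
    rw [(show PySem.Str.slice syl none (some 1) = "r" from (by rw [String.ext_iff, r1, c_r]; rfl))]
  by_cases c_z : syl.toList.take 1 = ['z']
  · rw [if_neg c_zh, if_neg c_ch, if_neg c_sh, if_neg c_b, if_neg c_p, if_neg c_m, if_neg c_f, if_neg c_d, if_neg c_t, if_neg c_n, if_neg c_l, if_neg c_g, if_neg c_k, if_neg c_h, if_neg c_j, if_neg c_q, if_neg c_x, if_neg c_r, if_pos c_z]
    rw [if_neg (by rintro (h|h|h); exacts [c_zh h, c_ch h, c_sh h])]
    rw [if_pos (Or.inr (Or.inr (Or.inr (Or.inr (Or.inr (Or.inr (Or.inr (Or.inr (Or.inr (Or.inr (Or.inr (Or.inr (Or.inr (Or.inr (Or.inr (Or.inl (c_z)))))))))))))))))]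
    rw [(show PySem.Str.slice syl none (some 1) = "z" from (by rw [String.ext_iff, r1, c_z]; rfl))]
  by_cases c_c : syl.toList.take 1 = ['c']
  · rw [if_neg c_zh, if_neg c_ch, if_neg c_sh, if_neg c_b, if_neg c_p, if_neg c_m, if_neg c_f, if_neg c_d, if_neg c_t, if_neg c_n, if_neg c_l, if_neg c_g, if_neg c_k, if_neg c_h, if_neg c_j, if_neg c_q, if_neg c_x, if_neg c_r, if_neg c_z, if_pos c_c]
    rw [if_neg (by rintro (h|h|h); exacts [c_zh h, c_ch h, c_sh h])]
    rw [if_pos (Or.inr (Or.inr (Or.inr (Or.inr (Or.inr (Or.inr (Or.inr (Or.inr (Or.inr (Or.inr (Or.inr (Or.inr (Or.inr (Or.inr (Or.inr (Or.inr (Or.inl (c_c))))))))))))))))))]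
    rw [(show PySem.Str.slice syl none (some 1) = "c" from (by rw [String.ext_iff, r1, c_c]; rfl))]
  by_cases c_s : syl.toList.take 1 = ['s']
  · rw [if_neg c_zh, if_neg c_ch, if_neg c_sh, if_neg c_b, if_neg c_p, if_neg c_m, if_neg c_f, if_neg c_d, if_neg c_t, if_neg c_n, if_neg c_l, if_neg c_g, if_neg c_k, if_neg c_h, if_neg c_j, if_neg c_q, if_neg c_x, if_neg c_r, if_neg c_z, if_neg c_c, if_pos c_s]
    rw [if_neg (by rintro (h|h|h); exacts [c_zh h, c_ch h, c_sh h])]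
    rw [if_pos (Or.inr (Or.inr (Or.inr (Or.inr (Or.inr (Or.inr (Or.inr (Or.inr (Or.inr (Or.inr (Or.inr (Or.inr (Or.inr (Or.inr (Or.inr (Or.inr (Or.inr (Or.inl (c_s)))))))))))))))))))]
    rw [(show PySem.Str.slice syl none (some 1) = "s" from (by rw [String.ext_iff, r1, c_s]; rfl))]
  by_cases c_y : syl.toList.take 1 = ['y']
  · rw [if_neg c_zh, if_neg c_ch, if_neg c_sh, if_neg c_b, if_neg c_p, if_neg c_m, if_neg c_f, if_neg c_d, if_neg c_t, if_neg c_n, if_neg c_l, if_neg c_g, if_neg c_k, if_neg c_h, if_neg c_j, if_neg c_q, if_neg c_x, if_neg c_r, if_neg c_z, if_neg c_c, if_neg c_s, if_pos c_y]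
    rw [if_neg (by rintro (h|h|h); exacts [c_zh h, c_ch h, c_sh h])]
    rw [if_pos (Or.inr (Or.inr (Or.inr (Or.inr (Or.inr (Or.inr (Or.inr (Or.inr (Or.inr (Or.inr (Or.inr (Or.inr (Or.inr (Or.inr (Or.inr (Or.inr (Or.inr (Or.inr (Or.inl (c_y))))))))))))))))))))]
    rw [(show PySem.Str.slice syl none (some 1) = "y" from (by rw [String.ext_iff, r1, c_y]; rfl))]
  by_cases c_w : syl.toList.take 1 = ['w']
  · rw [if_neg c_zh, if_neg c_ch, if_neg c_sh, if_neg c_b, if_neg c_p, if_neg c_m, if_neg c_f, if_neg c_d, if_neg c_t, if_neg c_n, if_neg c_l, if_neg c_g, if_neg c_k, if_neg c_h, if_neg c_j, if_neg c_q, if_neg c_x, if_neg c_r, if_neg c_z, if_neg c_c, if_neg c_s, if_neg c_y, if_pos c_w]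
    rw [if_neg (by rintro (h|h|h); exacts [c_zh h, c_ch h, c_sh h])]
    rw [if_pos (Or.inr (Or.inr (Or.inr (Or.inr (Or.inr (Or.inr (Or.inr (Or.inr (Or.inr (Or.inr (Or.inr (Or.inr (Or.inr (Or.inr (Or.inr (Or.inr (Or.inr (Or.inr (Or.inr (c_w))))))))))))))))))))]
    rw [(show PySem.Str.slice syl none (some 1) = "w" from (by rw [String.ext_iff, r1, c_w]; rfl))]
  rw [if_neg c_zh, if_neg c_ch, if_neg c_sh, if_neg c_b, if_neg c_p, if_neg c_m, if_neg c_f, if_neg c_d, if_neg c_t, if_neg c_n, if_neg c_l, if_neg c_g, if_neg c_k, if_neg c_h, if_neg c_j, if_neg c_q, if_neg c_x, if_neg c_r, if_neg c_z, if_neg c_c, if_neg c_s, if_neg c_y, if_neg c_w, if_neg (by rintro (h|h|h); exacts [c_zh h, c_ch h, c_sh h]), if_neg (by rintro (h|h|h|h|h|h|h|h|h|h|h|h|h|h|h|h|h|h|h|h); exacts [c_b h, c_p h, c_m h, c_f h, c_d h, c_t h, c_n h, c_l h, c_g h, c_k h, c_h h, c_j h, c_q h, c_x h, c_r h, c_z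 h, c_c h, c_s h, c_y h, c_w h])]


-- ===== VERDICT (by name: the statement is the Claim_ definition above) =====
theorem parse_pinyin_spec : Claim_equal_parse_pinyin := by
  intro p _
  unfold Spec_parse_pinyin parse_pinyin parse_pinyin_alt
  simp only [pinyinScan_eq_alt]
  split_ifs <;> rfl
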